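-- pv_equiv track=rewrite | github.com/shanmukatonangi/DSA_PY | Sliding-Window/swmsku.py | maxsumkunique
-- ===== SOURCE A (Python) =====
-- def maxsumkunique(nums,k):
--     freq={}
--     left=0
--     curr_sum=0
--     maxsum=0
--     #nums=[1,2,3,4,3]
--     #freq={3:2,4:1}
--     #left=2
--     #cs=0
--     #maxs=0
--
--     for right in range(len(nums)):
--         # freq[nums[right]]=freq.get(nums[right] , 0)+1   --- 0 1 2 3 4
--         if nums[right] in freq:
--          freq[nums[right]] += 1
--         else:
--          freq[nums[right]] = 1
--         #  freq[1]=1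
--         curr_sum= curr_sum+nums[right]  #0  -> 1 -> 3   ->6+4
--
--         #if window is greater than k we are shrinking it
--         if right-left+1 > k:
--             freq[nums[left]] -=1
--             curr_sum -=nums[left]  #10-1 =9-2+3=10
--
--             if freq[nums[left]]==0:
--                 del freq[nums[left]]
--
--             left=left+1
--
--           #if window is eqauls to k we are adding the subarraysum to max sum
--         if right-left+1 == k:
--             if len(freq)== k:
--                 maxsum=max(maxsum,curr_sum)  #6,#9
--
--
--
--     return maxsum
-- ===== SOURCE B (Python) =====
-- def maxsumkunique(nums, k):
--     if k <= 0:
--         return 0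
--     best = 0
--     for i in range(len(nums) - k + 1):
--         w = nums[i:i + k]
--         if len(set(w)) == k:
--             best = max(best, sum(w))
--     return best
-- ===== Notes on version B (the rewrite author's own statement) =====
-- stated objective: simpler
-- what changed: Replaces the incremental sliding window (frequency dict, running sum, moving left pointer) with a direct per-window scan that slices each k-length window, tests len(set(w)) == k and takes the max of its sum.
import Mathlib
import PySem

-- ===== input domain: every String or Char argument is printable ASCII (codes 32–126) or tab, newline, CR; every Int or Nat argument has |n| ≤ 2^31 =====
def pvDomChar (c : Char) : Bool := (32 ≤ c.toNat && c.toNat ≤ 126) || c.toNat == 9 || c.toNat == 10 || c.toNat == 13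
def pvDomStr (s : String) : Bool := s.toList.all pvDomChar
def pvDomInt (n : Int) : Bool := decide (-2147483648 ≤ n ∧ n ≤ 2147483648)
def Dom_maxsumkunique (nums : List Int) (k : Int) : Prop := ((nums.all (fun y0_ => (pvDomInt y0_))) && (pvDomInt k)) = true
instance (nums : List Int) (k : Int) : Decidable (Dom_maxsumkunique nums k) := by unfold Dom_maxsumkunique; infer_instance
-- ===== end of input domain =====

-- B replaces A's incremental sliding window (frequency dict + running sum + left pointer)
-- with a simpler direct per-window scan: slice each k-length window, test distinctness, max its sum.


-- ===== PORT A =====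
-- one iteration of A's `for right in range(len(nums))` loop body; state = (freq, left, curr_sum, maxsum)
def stepA (nums : List Int) (k : Int)
    (st : PySem.Dict Int Int × Int × Int × Int) (right : Int) :
    PySem.Dict Int Int × Int × Int × Int :=
  let (freq, left, curr_sum, maxsum) := st
  let x := PySem.List.pyGetD nums right 0          -- nums[right]; right is always in range
  let freq := if freq.contains x then freq.insert x (freq.getD x 0 + 1) else freq.insert x 1
  let curr_sum := curr_sum + x
  let (freq, left, curr_sum) :=
    if right - left + 1 > k then
      let y := PySem.List.pyGetD nums left 0       -- nums[left]; left is always in range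
      let freq := freq.insert y (freq.getD y 0 - 1)
      let curr_sum := curr_sum - y
      let freq := if freq.getD y 0 == 0 then freq.erase y else freq
      (freq, left + 1, curr_sum)
    else (freq, left, curr_sum)
  let maxsum :=
    if right - left + 1 == k then
      if (freq.size : Int) == k then max maxsum curr_sum else maxsum
    else maxsum
  (freq, left, curr_sum, maxsum)

def maxsumkunique (nums : List Int) (k : Int) : Int :=
  ((PySem.List.pyRange 0 (nums.length : Int)).foldl (stepA nums k)
    (PySem.Dict.empty, 0, 0, 0)).2.2.2

-- ===== PORT B =====
-- one iteration of B's `for i in range(len(nums) - k + 1)` loop body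
def stepB (nums : List Int) (k : Int) (best : Int) (i : Int) : Int :=
  let w := PySem.List.slice nums (some i) (some (i + k))
  if ((PySem.Set.ofList w).length : Int) == k then max best w.sum else best

def maxsumkunique_alt (nums : List Int) (k : Int) : Int :=
  if k ≤ 0 then 0
  else (PySem.List.pyRange 0 ((nums.length : Int) - k + 1)).foldl (stepB nums k) 0

-- ===== PRECONDITION & SPEC =====
def Spec_maxsumkunique (nums : List Int) (k : Int) (out : Int) : Prop := out = maxsumkunique_alt nums k
instance (nums : List Int) (k : Int) (out : Int) : Decidable (Spec_maxsumkunique nums k out) := by unfold Spec_maxsumkunique; infer_instance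

-- ===== CLAIM (what is proved, stated in full; the proofs are below) =====
def Claim_equal_maxsumkunique : Prop := ∀ (nums : List Int) (k : Int), Dom_maxsumkunique nums k → Spec_maxsumkunique nums k (maxsumkunique nums k)

-- ===== LEMMAS AND PROOFS =====

-- ---- small Dict.erase facts (not provided by the prelude) ----
theorem dict_get?_erase_self {ν : Type} (d : PySem.Dict Int ν) (y : Int) :
    (d.erase y).get? y = none := by
  simp [PySem.Dict.erase, PySem.Dict.get?, List.find?_eq_none]

theorem dict_get?_erase_of_ne {ν : Type} (d : PySem.Dict Int ν) {z y : Int} (h : z ≠ y) :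
    (d.erase y).get? z = d.get? z := by
  rcases d with ⟨items⟩
  induction items with
  | nil => rfl
  | cons p rest ih =>
    by_cases hp : p.1 = y
    · simp [PySem.Dict.erase, PySem.Dict.get?, hp, Ne.symm h] at *
      simpa [PySem.Dict.erase, PySem.Dict.get?] using ih
    · by_cases hz : p.1 = z
      · simp [PySem.Dict.erase, PySem.Dict.get?, hz, fun hzy => h hzy]
      · simp [PySem.Dict.erase, PySem.Dict.get?, hp, hz] at *
        simpa [PySem.Dict.erase, PySem.Dict.get?] using ih

theorem dict_getD_erase_self {ν : Type} (d : PySem.Dict Int ν) (y : Int) (d0 : ν) :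
    (d.erase y).getD y d0 = d0 := by
  simp [PySem.Dict.getD, dict_get?_erase_self]

theorem dict_getD_erase_of_ne {ν : Type} (d : PySem.Dict Int ν) {z y : Int} (h : z ≠ y) (d0 : ν) :
    (d.erase y).getD z d0 = d.getD z d0 := by
  simp [PySem.Dict.getD, dict_get?_erase_of_ne d h]

theorem dict_contains_erase_self {ν : Type} (d : PySem.Dict Int ν) (y : Int) :
    (d.erase y).contains y = false := by
  rw [PySem.Dict.contains_eq_isSome_get?, dict_get?_erase_self]
  rfl

theorem dict_contains_erase_of_ne {ν : Type} (d : PySem.Dict Int ν) {z y : Int} (h : z ≠ y) :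
    (d.erase y).contains z = d.contains z := by
  rw [PySem.Dict.contains_eq_isSome_get?, PySem.Dict.contains_eq_isSome_get?,
    dict_get?_erase_of_ne d h]

theorem dict_nodup_keys_erase {ν : Type} (d : PySem.Dict Int ν) (y : Int)
    (h : d.keys.Nodup) : (d.erase y).keys.Nodup := by
  exact ((List.filter_sublist).map Prod.fst).nodup h

-- d.size counts the distinct elements of w when d's keys are exactly w's elements
theorem dict_size_distinct (d : PySem.Dict Int Int) (w : List Int)
    (hnd : d.keys.Nodup) (hmem : ∀ x, d.contains x = decide (x ∈ w)) :
    d.size = (PySem.Set.ofList w).length := by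
  have hk : d.keys.Perm (PySem.Set.ofList w) := by
    rw [List.perm_ext_iff_of_nodup hnd (PySem.Set.nodup_ofList w)]
    intro a
    rw [PySem.Set.mem_ofList, ← PySem.Dict.contains_iff_mem_keys, hmem]
    simp
  have : d.keys.length = (PySem.Set.ofList w).length := hk.length_eq
  simpa [PySem.Dict.keys, PySem.Dict.size] using this

theorem pyRange_nonpos (b : Int) (h : b ≤ 0) : PySem.List.pyRange 0 b = [] := by
  simp [PySem.List.pyRange]
  omega

-- ---- the k ≤ 0 case: both programs return 0 ----
theorem alt_nonpos (nums : List Int) (k : Int) (hk : k ≤ 0) : maxsumkunique_alt nums k = 0 := by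
  rw [maxsumkunique_alt, if_pos hk]

theorem stepA_nonpos (nums : List Int) (k : Int) (hk : k ≤ 0) (m : Int) :
    stepA nums k (PySem.Dict.empty, m, 0, 0) m = (PySem.Dict.empty, m + 1, 0, 0) := by
  have hgt2 : k < 1 := by omega
  simp [stepA, hgt2, PySem.Dict.empty, PySem.Dict.contains, PySem.Dict.insert, PySem.Dict.getD,
    PySem.Dict.get?, PySem.Dict.erase, PySem.Dict.size]

theorem a_nonpos_aux (nums : List Int) (k : Int) (hk : k ≤ 0) (m : Nat) :
    ((List.range m).map (fun i : Nat => (i : Int))).foldl (stepA nums k) (PySem.Dict.empty, 0, 0, 0) =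
      (PySem.Dict.empty, (m : Int), 0, 0) := by
  induction m with
  | zero => simp
  | succ m ih =>
    rw [List.range_succ, List.map_append, List.foldl_append, ih]
    simp [stepA_nonpos nums k hk (m : Int)]

theorem a_nonpos (nums : List Int) (k : Int) (hk : k ≤ 0) : maxsumkunique nums k = 0 := by
  rw [maxsumkunique, PySem.List.pyRange_zero_natCast, a_nonpos_aux nums k hk]

-- ---- the k ≥ 1 case ----

-- the window nums[left:m] maintained by A after m iterations (left = m - min m kk)
def win (nums : List Int) (kk m : Nat) : List Int := (nums.take m).drop (m - kk)

-- A's maxsum after m iterations: B's fold over the windows completed so far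
def Mx (nums : List Int) (k : Int) (kk m : Nat) : Int :=
  ((List.range (m + 1 - kk)).map (fun i : Nat => (i : Int))).foldl (stepB nums k) 0

def InvA (nums : List Int) (k : Int) (kk m : Nat)
    (st : PySem.Dict Int Int × Int × Int × Int) : Prop :=
  st.2.1 = ((m - min m kk : Nat) : Int) ∧
  st.2.2.1 = (win nums kk m).sum ∧
  st.2.2.2 = Mx nums k kk m ∧
  (∀ x, st.1.getD x 0 = ((win nums kk m).count x : Int)) ∧
  st.1.keys.Nodup ∧
  (∀ x, st.1.contains x = decide (x ∈ win nums kk m))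

theorem invA_step (nums : List Int) (k : Int) (kk m : Nat) (hk : k = (kk : Int)) (hkk : 1 ≤ kk)
    (hm : m < nums.length) (st : PySem.Dict Int Int × Int × Int × Int)
    (h : InvA nums k kk m st) : InvA nums k kk (m + 1) (stepA nums k st (m : Int)) := by
  obtain ⟨d, l, c, mx⟩ := st
  obtain ⟨hl, hc, hmx, hcnt, hnd, hmem⟩ := h
  simp only at hl hc hmx hcnt hnd hmem
  have hx : PySem.List.pyGetD nums (m : Int) 0 = nums[m] := by
    rw [PySem.List.pyGetD_natCast]; exact List.getD_eq_getElem nums 0 hm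
  have hwin1 : win nums kk m ++ [nums[m]] = (nums.take (m + 1)).drop (m - kk) := by
    rw [win, List.take_succ_eq_append_getElem hm,
      List.drop_append_of_le_length (by simp; omega)]
  have hins : (if d.contains nums[m] then d.insert nums[m] (d.getD nums[m] 0 + 1)
      else d.insert nums[m] 1) = d.insert nums[m] (d.getD nums[m] 0 + 1) := by
    by_cases hcx : d.contains nums[m]
    · simp [hcx]
    · rw [if_neg (by simp [hcx]),
        PySem.Dict.getD_of_not_contains d 0 (by simpa using hcx)]
      norm_num
  have hcnt1 : ∀ z, (d.insert nums[m] (d.getD nums[m] 0 + 1)).getD z 0 =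
      (((win nums kk m ++ [nums[m]]).count z : Nat) : Int) := by
    intro z
    rw [PySem.Dict.getD_insert]
    by_cases hz : z = nums[m]
    · subst hz; rw [if_pos rfl, hcnt]; simp [List.count_append]
    · rw [if_neg hz, hcnt z]; simp [List.count_append, List.count_singleton, Ne.symm hz]
  have hmem1 : ∀ z, (d.insert nums[m] (d.getD nums[m] 0 + 1)).contains z =
      decide (z ∈ win nums kk m ++ [nums[m]]) := by
    intro z
    rw [PySem.Dict.contains_insert, hmem z]
    by_cases hz : z = nums[m] <;> simp [hz]
  have hnd1 : (d.insert nums[m] (d.getD nums[m] 0 + 1)).keys.Nodup :=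
    PySem.Dict.nodup_keys_insert d _ _ hnd
  rcases Nat.lt_or_ge m kk with hmA | hmB
  · -- no shrink: the window is still growing
    have hl0 : l = 0 := by rw [hl]; simp [Nat.min_eq_left (le_of_lt hmA)]
    have hnoshr : ¬((m : Int) - l + 1 > k) := by rw [hl0, hk]; omega
    have hwin2 : win nums kk (m + 1) = win nums kk m ++ [nums[m]] := by
      rw [hwin1, win]; congr 1; omega
    have hstep : stepA nums k (d, l, c, mx) (m : Int) =
        (d.insert nums[m] (d.getD nums[m] 0 + 1), l, c + nums[m],
          if ((m : Int) - l + 1 == k) then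
            (if ((d.insert nums[m] (d.getD nums[m] 0 + 1)).size : Int) == k then
              max mx (c + nums[m]) else mx)
          else mx) := by
      simp only [stepA, hx, hins, if_neg hnoshr]
    rw [hstep]
    refine ⟨?_, ?_, ?_, ?_, hnd1, ?_⟩
    · simp only [hl0]; simp [Nat.min_eq_left hmA]
    · simp only [hwin2, List.sum_append, hc]; simp
    · -- maxsum component
      by_cases hfull : m + 1 = kk
      · have hcond : (((m : Int) - l + 1 == k)) = true := by
          rw [hl0, hk, beq_iff_eq]; omega
        have hmx0 : mx = 0 := by
          rw [hmx, Mx, Nat.sub_eq_zero_of_le (by omega)]; simp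
        have hMx1 : Mx nums k kk (m + 1) = stepB nums k 0 0 := by
          rw [Mx, show m + 1 + 1 - kk = 1 by omega]; simp [List.range_one]
        have hw : PySem.List.slice nums (some 0) (some ((0 : Int) + k)) =
            win nums kk (m + 1) := by
          rw [hk, win]
          simp only [zero_add, PySem.List.slice_zero_start, PySem.List.slice_to_natCast]
          rw [Nat.sub_eq_zero_of_le (by omega), List.drop_zero, ← hfull]
        have hsz : ((d.insert nums[m] (d.getD nums[m] 0 + 1)).size : Int) =
            ((PySem.Set.ofList (win nums kk (m + 1))).length : Int) := by
          rw [dict_size_distinct _ (win nums kk (m + 1)) hnd1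
            (by intro z; rw [hmem1 z, hwin2])]
        simp only [hcond, if_true, hMx1, stepB, hw, hsz, hmx0]
        simp only [hwin2, List.sum_append, hc]
        simp
      · have hcond : (((m : Int) - l + 1 == k)) = false := by
          rw [hl0, hk]; simp [beq_iff_eq]; omega
        simp only [hcond, Bool.false_eq_true, if_false, hmx, Mx]
        rw [Nat.sub_eq_zero_of_le (by omega), Nat.sub_eq_zero_of_le (by omega)]
    · intro z; simp only [hwin2]; exact hcnt1 z
    · intro z; simp only [hwin2]; exact hmem1 z
  · -- shrink: the left end moves one step
    have hlB : l = ((m - kk : Nat) : Int) := by rw [hl]; congr 1; omega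
    have hlB' : l = (m : Int) - kk := by rw [hlB]; omega
    have hshr : (m : Int) - l + 1 > k := by rw [hlB', hk]; omega
    have hmkk : m - kk < nums.length := by omega
    have hy : PySem.List.pyGetD nums l 0 = nums[m - kk] := by
      rw [hlB, PySem.List.pyGetD_natCast]; exact List.getD_eq_getElem nums 0 hmkk
    have hwin3 : win nums kk m ++ [nums[m]] = nums[m - kk] :: win nums kk (m + 1) := by
      rw [hwin1, win]
      have hlen : m - kk < (nums.take (m + 1)).length := by simp; omega
      rw [List.drop_eq_getElem_cons hlen]
      congr 1
      · simp
      · congr 1; omega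
    -- the dict after the decrement
    set f1 := d.insert nums[m] (d.getD nums[m] 0 + 1) with hf1
    set f2 := f1.insert nums[m - kk] (f1.getD nums[m - kk] 0 - 1) with hf2
    have hcnt2 : ∀ z, f2.getD z 0 = (((win nums kk (m + 1)).count z : Nat) : Int) := by
      intro z
      rw [hf2, PySem.Dict.getD_insert]
      by_cases hz : z = nums[m - kk]
      · subst hz
        rw [if_pos rfl, hcnt1]
        rw [hwin3]; simp [List.count_cons]
      · rw [if_neg hz, hcnt1 z]
        rw [hwin3]; simp [List.count_cons, Ne.symm hz]
    have hmem2 : ∀ z, f2.contains z =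
        (z == nums[m - kk] || decide (z ∈ win nums kk (m + 1))) := by
      intro z
      rw [hf2, PySem.Dict.contains_insert, hmem1 z]
      by_cases hz : z = nums[m - kk]
      · simp [hz]
      · simp only [hz, decide_false, Bool.false_or, hwin3]
        simp [hz]
    have hnd2 : f2.keys.Nodup := PySem.Dict.nodup_keys_insert _ _ _ hnd1
    -- the dict after the conditional delete
    set f3 := if (f2.getD nums[m - kk] 0 == 0) then f2.erase nums[m - kk] else f2 with hf3
    have hcnt3 : ∀ z, f3.getD z 0 = (((win nums kk (m + 1)).count z : Nat) : Int) := by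
      intro z
      rw [hf3]
      split_ifs with hdel
      · by_cases hz : z = nums[m - kk]
        · subst hz
          rw [dict_getD_erase_self]
          have := hcnt2 nums[m - kk]
          rw [beq_iff_eq] at hdel
          omega
        · rw [dict_getD_erase_of_ne _ hz, hcnt2 z]
      · exact hcnt2 z
    have hmem3 : ∀ z, f3.contains z = decide (z ∈ win nums kk (m + 1)) := by
      intro z
      rw [hf3]
      split_ifs with hdel
      · by_cases hz : z = nums[m - kk]
        · subst hz
          rw [dict_contains_erase_self]
          have hc0 := hcnt2 nums[m - kk]
          rw [beq_iff_eq] at hdel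
          have : (win nums kk (m + 1)).count nums[m - kk] = 0 := by omega
          simp [List.count_eq_zero.mp this]
        · rw [dict_contains_erase_of_ne _ hz, hmem2 z]
          simp [hz]
      · rw [hmem2 z]
        by_cases hz : z = nums[m - kk]
        · have hc0 := hcnt2 nums[m - kk]
          rw [beq_iff_eq] at hdel
          have hpos : 0 < (win nums kk (m + 1)).count nums[m - kk] := by omega
          simp [hz, List.count_pos_iff.mp hpos]
        · simp [hz]
    have hnd3 : f3.keys.Nodup := by
      rw [hf3]; split_ifs
      · exact dict_nodup_keys_erase _ _ hnd2
      · exact hnd2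
    -- sums
    have hsum : c + nums[m] - nums[m - kk] = (win nums kk (m + 1)).sum := by
      have := congrArg List.sum hwin3
      simp only [List.sum_append, List.sum_cons, List.sum_nil] at this
      omega
    have hstep : stepA nums k (d, l, c, mx) (m : Int) =
        (f3, l + 1, c + nums[m] - nums[m - kk],
          if ((m : Int) - (l + 1) + 1 == k) then
            (if (f3.size : Int) == k then max mx (c + nums[m] - nums[m - kk]) else mx)
          else mx) := by
      simp only [stepA, hx, hins, if_pos hshr, hy, ← hf1, ← hf2, ← hf3]
    rw [hstep]
    have hcond : (((m : Int) - (l + 1) + 1 == k)) = true := by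
      rw [hlB', hk, beq_iff_eq]; omega
    refine ⟨?_, ?_, ?_, hcnt3, hnd3, hmem3⟩
    · simp only [hlB']; rw [Nat.min_eq_right (by omega)]; push_cast; omega
    · exact hsum
    · -- maxsum component
      have hMx1 : Mx nums k kk (m + 1) =
          stepB nums k (Mx nums k kk m) ((m + 1 - kk : Nat) : Int) := by
        rw [Mx, Mx, show m + 1 + 1 - kk = (m + 1 - kk) + 1 by omega,
          List.range_succ, List.map_append, List.foldl_append]
        simp
      have harg : ((m + 1 - kk : Nat) : Int) + k = ((m + 1 : Nat) : Int) := by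
        rw [hk]; omega
      have hw : PySem.List.slice nums (some ((m + 1 - kk : Nat) : Int))
          (some (((m + 1 - kk : Nat) : Int) + k)) = win nums kk (m + 1) := by
        rw [harg, PySem.List.slice_natCast, win, List.drop_take]
      have hsz : (f3.size : Int) =
          ((PySem.Set.ofList (win nums kk (m + 1))).length : Int) := by
        rw [dict_size_distinct f3 (win nums kk (m + 1)) hnd3 hmem3]
      simp only [hcond, if_true, hMx1, stepB, hw, hsz, hmx, hsum]

theorem invA_all (nums : List Int) (k : Int) (kk : Nat) (hk : k = (kk : Int)) (hkk : 1 ≤ kk)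
    (m : Nat) (hm : m ≤ nums.length) :
    InvA nums k kk m (((List.range m).map (fun i : Nat => (i : Int))).foldl (stepA nums k)
      (PySem.Dict.empty, 0, 0, 0)) := by
  induction m with
  | zero =>
    refine ⟨by simp, by simp [win], by simp [Mx, Nat.sub_eq_zero_of_le hkk], ?_, ?_, ?_⟩
    · intro x; simp [win, PySem.Dict.getD_empty]
    · simp [PySem.Dict.keys, PySem.Dict.empty]
    · intro x; simp [win, PySem.Dict.contains_empty]
  | succ m ih =>
    rw [List.range_succ, List.map_append, List.foldl_append]
    exact invA_step nums k kk m hk hkk (by omega) _ (ih (by omega))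

theorem a_pos (nums : List Int) (k : Int) (kk : Nat) (hk : k = (kk : Int)) (hkk : 1 ≤ kk) :
    maxsumkunique nums k = Mx nums k kk nums.length := by
  have h := invA_all nums k kk hk hkk nums.length le_rfl
  rw [maxsumkunique, PySem.List.pyRange_zero_natCast]
  exact h.2.2.1

theorem alt_pos (nums : List Int) (k : Int) (kk : Nat) (hk : k = (kk : Int)) (_hkk : 1 ≤ kk) :
    maxsumkunique_alt nums k = Mx nums k kk nums.length := by
  rw [maxsumkunique_alt, if_neg (by omega), Mx]
  by_cases hn : nums.length + 1 ≤ kk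
  · rw [Nat.sub_eq_zero_of_le hn, pyRange_nonpos _ (by omega)]
    simp
  · have hcast : ((nums.length : Int) - k + 1) = ((nums.length + 1 - kk : Nat) : Int) := by
      subst hk; omega
    rw [hcast, PySem.List.pyRange_zero_natCast]

-- ===== VERDICT (by name: the statement is the Claim_ definition above) =====
theorem maxsumkunique_spec : Claim_equal_maxsumkunique := by
  intro nums k _
  unfold Spec_maxsumkunique
  by_cases hk : k ≤ 0
  · rw [a_nonpos nums k hk, alt_nonpos nums k hk]
  · have h1 : k = (k.toNat : Int) := (Int.toNat_of_nonneg (by omega)).symm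
    have h2 : 1 ≤ k.toNat := by omega
    rw [a_pos nums k k.toNat h1 h2, alt_pos nums k k.toNat h1 h2]
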